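-- pv_equiv track=rewrite | github.com/Rafael2022-prog/arthen-lang | stdlib/arthen_stdlib_implementation.py | implement_countermeasures
-- ===== SOURCE A (Python) =====
-- from typing import Dict, List, Any, Optional, Tuple, Union
--
-- def implement_countermeasures(patterns: List[Dict[str, Any]]) -> Dict[str, Any]:
--     """Implement countermeasures against detected attacks"""
--     countermeasures = {
--         'rate_limiting_enabled': False,
--         'ip_blocking_enabled': False,
--         'account_lockout_enabled': False
--     }
--
--     for pattern in patterns:
--         if pattern['type'] == 'ddos':
--             countermeasures['rate_limiting_enabled'] = True
--             countermeasures['ip_blocking_enabled'] = True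
--         elif pattern['type'] == 'brute_force':
--             countermeasures['account_lockout_enabled'] = True
--
--     return countermeasures
-- ===== SOURCE B (Python) =====
-- from typing import Dict, List, Any
--
-- def implement_countermeasures(patterns: List[Dict[str, Any]]) -> Dict[str, Any]:
--     """Implement countermeasures against detected attacks"""
--     ddos_seen = any(p['type'] == 'ddos' for p in patterns)
--     brute_force_seen = any(p['type'] == 'brute_force' for p in patterns)
--     return {
--         'rate_limiting_enabled': ddos_seen,
--         'ip_blocking_enabled': ddos_seen,
--         'account_lockout_enabled': brute_force_seen
--     }
-- ===== Notes on version B (the rewrite author's own statement) =====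
-- stated objective: idiomatic
-- what changed: Replaces A's single pass with branch-in-loop mutation of a flag dict by two staged, independently short-circuiting any() searches (one per attack type), each of which can stop at its first hit, then builds the result dict in one literal.
import Mathlib
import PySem

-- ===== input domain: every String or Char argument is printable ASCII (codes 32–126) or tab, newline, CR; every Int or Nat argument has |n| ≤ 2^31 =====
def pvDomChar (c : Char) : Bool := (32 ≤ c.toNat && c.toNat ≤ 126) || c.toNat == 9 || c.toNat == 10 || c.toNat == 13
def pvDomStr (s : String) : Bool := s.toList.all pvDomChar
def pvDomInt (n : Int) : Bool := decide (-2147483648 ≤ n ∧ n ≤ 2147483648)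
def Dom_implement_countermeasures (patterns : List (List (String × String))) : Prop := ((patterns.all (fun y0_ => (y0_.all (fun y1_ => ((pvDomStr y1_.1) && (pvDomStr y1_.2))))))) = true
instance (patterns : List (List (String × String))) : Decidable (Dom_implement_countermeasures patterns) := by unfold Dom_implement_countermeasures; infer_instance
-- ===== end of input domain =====

-- B replaces A's branch-in-loop flag mutation by two staged short-circuiting any() searches,
-- one per attack type (objective: idiomatic).


-- shared helper: pattern['type'] (total form; Pre_ guarantees the key is present)
def pvGetType (p : List (String × String)) : String :=
  ((PySem.Dict.mk p).get? "type").getD ""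

-- ===== PORT A =====
def implement_countermeasures (patterns : List (List (String × String))) : List (String × Bool) :=
  (patterns.foldl (fun cm p =>
      if pvGetType p = "ddos" then
        (cm.insert "rate_limiting_enabled" true).insert "ip_blocking_enabled" true
      else if pvGetType p = "brute_force" then
        cm.insert "account_lockout_enabled" true
      else cm)
    (PySem.Dict.mk [("rate_limiting_enabled", false),
                    ("ip_blocking_enabled", false),
                    ("account_lockout_enabled", false)])).items

-- ===== PORT B =====
-- two staged short-circuiting searches (List.any stops at the first hit, like Python's any())
def implement_countermeasures_alt (patterns : List (List (String × String))) : List (String × Bool) :=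
  let ddos_seen := patterns.any (fun p => pvGetType p == "ddos")
  let brute_force_seen := patterns.any (fun p => pvGetType p == "brute_force")
  [("rate_limiting_enabled", ddos_seen),
   ("ip_blocking_enabled", ddos_seen),
   ("account_lockout_enabled", brute_force_seen)]

-- ===== PRECONDITION & SPEC =====
-- Pre_: every pattern dict has the key 'type' (otherwise Python A raises KeyError).
def Pre_implement_countermeasures (patterns : List (List (String × String))) : Prop :=
  ∀ p ∈ patterns, (PySem.Dict.mk p).contains "type" = true
instance (patterns : List (List (String × String))) : Decidable (Pre_implement_countermeasures patterns) := by unfold Pre_implement_countermeasures; infer_instance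
def pvWitness_implement_countermeasures : (List (List (String × String))) := [[("type", "ddos")], [("type", "scan")]]

def Spec_implement_countermeasures (patterns : List (List (String × String))) (out : List (String × Bool)) : Prop := out = implement_countermeasures_alt patterns
instance (patterns : List (List (String × String))) (out : List (String × Bool)) : Decidable (Spec_implement_countermeasures patterns out) := by unfold Spec_implement_countermeasures; infer_instance

-- ===== CLAIM (what is proved, stated in full; the proofs are below) =====
def Claim_equal_implement_countermeasures : Prop := ∀ (patterns : List (List (String × String))), Dom_implement_countermeasures patterns → Pre_implement_countermeasures patterns → Spec_implement_countermeasures patterns (implement_countermeasures patterns)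

-- ===== LEMMAS AND PROOFS =====

-- A's loop, on any state with the three fixed keys, just ORs in "some ddos / some brute_force".
lemma foldA_char (ps : List (List (String × String))) (a b c : Bool) :
    ps.foldl (fun cm p =>
      if pvGetType p = "ddos" then
        (cm.insert "rate_limiting_enabled" true).insert "ip_blocking_enabled" true
      else if pvGetType p = "brute_force" then
        cm.insert "account_lockout_enabled" true
      else cm)
      (PySem.Dict.mk [("rate_limiting_enabled", a),
                      ("ip_blocking_enabled", b),
                      ("account_lockout_enabled", c)]) =
    PySem.Dict.mk [("rate_limiting_enabled", a || ps.any (fun p => pvGetType p == "ddos")),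
                   ("ip_blocking_enabled", b || ps.any (fun p => pvGetType p == "ddos")),
                   ("account_lockout_enabled", c || ps.any (fun p => pvGetType p == "brute_force"))] := by
  induction ps generalizing a b c with
  | nil => simp
  | cons p ps ih =>
    simp only [List.foldl_cons, List.any_cons]
    by_cases hd : pvGetType p = "ddos"
    · have h1 : (PySem.Dict.mk [("rate_limiting_enabled", a),
                      ("ip_blocking_enabled", b),
                      ("account_lockout_enabled", c)]).insert "rate_limiting_enabled" true
          = PySem.Dict.mk [("rate_limiting_enabled", true),
                      ("ip_blocking_enabled", b),
                      ("account_lockout_enabled", c)] := by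
        apply PySem.Dict.ext; simp [PySem.Dict.items_insert]
      have h2 : (PySem.Dict.mk [("rate_limiting_enabled", true),
                      ("ip_blocking_enabled", b),
                      ("account_lockout_enabled", c)]).insert "ip_blocking_enabled" true
          = PySem.Dict.mk [("rate_limiting_enabled", true),
                      ("ip_blocking_enabled", true),
                      ("account_lockout_enabled", c)] := by
        apply PySem.Dict.ext; simp [PySem.Dict.items_insert]
      have hdb : (pvGetType p == "ddos") = true := by simp [hd]
      rw [if_pos hd, h1, h2, ih, hdb]
      simp [hd]
    · have hdb : (pvGetType p == "ddos") = false := by simp [hd]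
      rw [if_neg hd]
      by_cases hb : pvGetType p = "brute_force"
      · have h3 : (PySem.Dict.mk [("rate_limiting_enabled", a),
                      ("ip_blocking_enabled", b),
                      ("account_lockout_enabled", c)]).insert "account_lockout_enabled" true
            = PySem.Dict.mk [("rate_limiting_enabled", a),
                      ("ip_blocking_enabled", b),
                      ("account_lockout_enabled", true)] := by
          apply PySem.Dict.ext; simp [PySem.Dict.items_insert]
        have hbb : (pvGetType p == "brute_force") = true := by simp [hb]
        rw [if_pos hb, h3, ih, hdb, hbb]
        simp
      · have hbb : (pvGetType p == "brute_force") = false := by simp [hb]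
        rw [if_neg hb, ih, hdb, hbb]
        simp

-- ===== VERDICT (by name: the statement is the Claim_ definition above) =====
theorem implement_countermeasures_spec : Claim_equal_implement_countermeasures := by
  intro patterns _ _
  show implement_countermeasures patterns = implement_countermeasures_alt patterns
  unfold implement_countermeasures implement_countermeasures_alt
  rw [foldA_char]
  rfl
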